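-- pv_equiv track=rewrite | github.com/markedel/python-g | filefmt.py | numberedLine
-- ===== SOURCE A (Python) =====
-- def numberedLine(text, lineNum):
--     """Return a single line (lineNum) from text.  Note, that this inefficiently scans
--     the entire text for newlines to find the specified line."""
--     startIdx = 0
--     for i in range(lineNum-1):
--         startIdx = text.find('\n', startIdx)
--         if startIdx == -1:
--             return ""
--         startIdx += 1
--     endIdx = text.find('\n', startIdx)
--     if endIdx == -1:
--         return text[startIdx:]
--     return text[startIdx:endIdx]
-- ===== SOURCE B (Python) =====
-- def numberedLine(text, lineNum):
--     """Return a single line (lineNum) from text: split once, then index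
--     (line numbers below 1 clamp to the first line; past the end gives "")."""
--     lines = text.split('\n')
--     idx = max(lineNum - 1, 0)
--     return lines[idx] if idx < len(lines) else ""
-- ===== Notes on version B (the rewrite author's own statement) =====
-- stated objective: simpler
-- what changed: Replaces A's newline-by-newline find loop with a single text.split('\n') followed by clamped indexing into the resulting line list.
import Mathlib
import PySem

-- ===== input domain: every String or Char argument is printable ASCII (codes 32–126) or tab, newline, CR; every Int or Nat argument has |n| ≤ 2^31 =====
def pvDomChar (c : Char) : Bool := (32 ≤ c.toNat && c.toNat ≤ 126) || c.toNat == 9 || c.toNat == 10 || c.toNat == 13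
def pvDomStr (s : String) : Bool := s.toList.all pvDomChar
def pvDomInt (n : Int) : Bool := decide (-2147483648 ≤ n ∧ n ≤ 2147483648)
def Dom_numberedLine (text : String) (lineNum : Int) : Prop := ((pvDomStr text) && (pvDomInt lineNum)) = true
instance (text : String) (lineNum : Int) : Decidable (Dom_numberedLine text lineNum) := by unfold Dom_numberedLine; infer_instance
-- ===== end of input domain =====

-- B replaces A's newline-by-newline find loop by one split('\n') plus clamped indexing (objective: simpler).

-- ===== PORT A =====
-- the 'for i in range(lineNum-1)' loop: returns none where Python does 'return ""', else the final startIdx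
def numberedLineGo (text : String) (n : Nat) (startIdx : Int) : Option Int :=
  match n with
  | 0 => some startIdx
  | Nat.succ m =>
    let s := PySem.Str.findFrom text "\n" startIdx
    if s = -1 then none
    else numberedLineGo text m (s + 1)

def numberedLine (text : String) (lineNum : Int) : String :=
  match numberedLineGo text (lineNum - 1).toNat 0 with
  | none => ""
  | some startIdx =>
    let endIdx := PySem.Str.findFrom text "\n" startIdx
    if endIdx = -1 then PySem.Str.slice text (some startIdx) none
    else PySem.Str.slice text (some startIdx) (some endIdx)

-- ===== PORT B =====
def numberedLine_alt (text : String) (lineNum : Int) : String :=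
  let lines := (PySem.Str.split? text "\n").getD []   -- sep "\n" ≠ "", so split? is always some
  let idx := max (lineNum - 1) 0
  if idx < (lines.length : Int) then lines.getD idx.toNat "" else ""

-- ===== PRECONDITION & SPEC =====
def Spec_numberedLine (text : String) (lineNum : Int) (out : String) : Prop := out = numberedLine_alt text lineNum
instance (text : String) (lineNum : Int) (out : String) : Decidable (Spec_numberedLine text lineNum out) := by unfold Spec_numberedLine; infer_instance

-- ===== CLAIM (what is proved, stated in full; the proofs are below) =====
def Claim_equal_numberedLine : Prop := ∀ (text : String) (lineNum : Int), Dom_numberedLine text lineNum → Spec_numberedLine text lineNum (numberedLine text lineNum)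

-- ===== LEMMAS AND PROOFS =====

-- simple structural form of splitting on '\n'
def splitNL : List Char → List (List Char)
  | [] => [[]]
  | c :: l => if c = '\n' then [] :: splitNL l else (splitNL l).modifyHead (c :: ·)

-- index of the first '\n', structurally
def fNL : List Char → Option Nat
  | [] => none
  | c :: l => if c = '\n' then some 0 else (fNL l).map (· + 1)

theorem splitNL_ne_nil (M : List Char) : splitNL M ≠ [] := by
  induction M with
  | nil => simp [splitNL]
  | cons c l ih =>
    simp only [splitNL]
    split_ifs
    · simp
    · cases h : splitNL l with
      | nil => exact absurd h ih
      | cons a t => simp [List.modifyHead]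

theorem findgo_eq_fNL (M : List Char) (k : Nat) :
    PySem.Chars.find.go ['\n'] M k =
      match fNL M with
      | none => -1
      | some j => (k : Int) + j := by
  induction M generalizing k with
  | nil => simp [PySem.Chars.find.go, fNL]
  | cons c l ih =>
    rw [PySem.Chars.find.go.eq_2]
    by_cases hc : c = '\n'
    · subst hc
      simp [List.isPrefixOf, fNL]
    · have hp : List.isPrefixOf ['\n'] (c :: l) = false := by
        simp [List.isPrefixOf]
        intro h; exact absurd h.symm hc
      rw [hp]
      simp only [Bool.false_eq_true, if_false]
      rw [ih]
      cases h : fNL l with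
      | none => simp [fNL, hc, h]
      | some j => simp [fNL, hc, h]; ring

theorem find_eq_fNL (M : List Char) :
    PySem.Chars.find M ['\n'] =
      match fNL M with
      | none => -1
      | some j => (j : Int) := by
  have := findgo_eq_fNL M 0
  simpa [PySem.Chars.find] using this

theorem fNL_none_splitNL {M : List Char} (h : fNL M = none) : splitNL M = [M] := by
  induction M with
  | nil => simp [splitNL]
  | cons c l ih =>
    simp only [fNL] at h
    by_cases hc : c = '\n'
    · simp [hc] at h
    · simp [hc] at h
      simp [splitNL, hc, ih h, List.modifyHead]

theorem fNL_some_splitNL {M : List Char} {j : Nat} (h : fNL M = some j) :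
    j + 1 ≤ M.length ∧ splitNL M = M.take j :: splitNL (M.drop (j + 1)) := by
  induction M generalizing j with
  | nil => simp [fNL] at h
  | cons c l ih =>
    simp only [fNL] at h
    by_cases hc : c = '\n'
    · simp [hc] at h
      subst h
      simp [splitNL, hc]
    · simp [hc] at h
      obtain ⟨j', hj', rfl⟩ := h
      obtain ⟨h1, h2⟩ := ih hj'
      constructor
      · simpa using h1
      · simp [splitNL, hc, h2, List.modifyHead]

-- characterisation of the accumulator-style PySem splitOn against splitNL
theorem splitOnGo_eq (fuel : Nat) (l cur : List Char) (acc : List (List Char))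
    (hf : l.length ≤ fuel) :
    PySem.Chars.splitOn.go ['\n'] fuel l cur acc =
      acc.reverse ++ (splitNL l).modifyHead (cur.reverse ++ ·) := by
  induction fuel generalizing l cur acc with
  | zero =>
    have : l = [] := List.eq_nil_of_length_eq_zero (Nat.le_zero.mp hf)
    subst this
    simp [PySem.Chars.splitOn.go, splitNL, List.modifyHead]
  | succ f ih =>
    cases l with
    | nil => simp [PySem.Chars.splitOn.go, splitNL, List.modifyHead]
    | cons c rest =>
      rw [show PySem.Chars.splitOn.go ['\n'] (f+1) (c :: rest) cur acc =
          if List.isPrefixOf ['\n'] (c :: rest) = true then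
            PySem.Chars.splitOn.go ['\n'] f (List.drop 1 (c :: rest)) [] (cur.reverse :: acc)
          else PySem.Chars.splitOn.go ['\n'] f rest (c :: cur) acc from rfl]
      by_cases hc : c = '\n'
      · subst hc
        simp only [List.isPrefixOf, BEq.rfl, Bool.and_true, List.isPrefixOf.eq_1]
        rw [ih _ _ _ (by simpa using Nat.le_of_succ_le_succ hf)]
        simp only [List.drop_one, List.tail_cons, splitNL]
        cases h : splitNL rest with
        | nil => exact absurd h (splitNL_ne_nil rest)
        | cons a t => simp [List.modifyHead]
      · have hp : List.isPrefixOf ['\n'] (c :: rest) = false := by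
          simp [List.isPrefixOf]
          intro h; exact absurd h.symm hc
        rw [hp]
        simp only [Bool.false_eq_true, if_false]
        rw [ih _ _ _ (by simpa using Nat.le_of_succ_le_succ hf)]
        simp only [splitNL, if_neg hc]
        cases h : splitNL rest with
        | nil => exact absurd h (splitNL_ne_nil rest)
        | cons a t => simp [List.modifyHead]

theorem splitOn_eq_splitNL (M : List Char) :
    PySem.Chars.splitOn M ['\n'] = splitNL M := by
  rw [PySem.Chars.splitOn, splitOnGo_eq _ _ _ _ (by omega)]
  cases h : splitNL M with
  | nil => exact absurd h (splitNL_ne_nil M)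
  | cons a t => simp [List.modifyHead]

-- the loop invariant: from index k, after n successful steps we sit at the start of line n of drop k
theorem numberedLineGo_spec (text : String) (n k : Nat) (hk : k ≤ text.toList.length) :
    (numberedLineGo text n k = none → (splitNL (text.toList.drop k)).length ≤ n) ∧
    (∀ j : Int, numberedLineGo text n k = some j →
      ∃ j' : Nat, j = (j' : Int) ∧ j' ≤ text.toList.length ∧
        splitNL (text.toList.drop j') = (splitNL (text.toList.drop k)).drop n) := by
  induction n generalizing k with
  | zero =>
    constructor
    · intro h; simp [numberedLineGo] at h
    · intro j hj
      simp [numberedLineGo] at hj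
      exact ⟨k, hj.symm, hk, by simp⟩
  | succ m ih =>
    have hfind : PySem.Str.findFrom text "\n" (k : Int) =
        match fNL (text.toList.drop k) with
        | none => -1
        | some fj => (k : Int) + fj := by
      rw [PySem.Str.findFrom_eq]
      rw [show ("\n" : String).toList = ['\n'] from rfl]
      rw [PySem.Chars.findFrom_natCast _ _ k hk, find_eq_fNL]
      cases h : fNL (text.toList.drop k) with
      | none => simp
      | some fj => simp
    cases h : fNL (text.toList.drop k) with
    | none =>
      -- find = -1: Python returns "" here
      constructor
      · intro _
        rw [fNL_none_splitNL h]
        simp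
      · intro j hj
        simp only [numberedLineGo, hfind, h] at hj
        simp at hj
    | some fj =>
      obtain ⟨hlen, hsplit⟩ := fNL_some_splitNL h
      have hklen : k + fj + 1 ≤ text.toList.length := by
        have := text.toList.length_drop (i := k)
        omega
      have hstep : numberedLineGo text (m+1) (k : Int) = numberedLineGo text m ((k + fj + 1 : Nat) : Int) := by
        simp only [numberedLineGo, hfind, h]
        have hne : ¬ ((k : Int) + fj = -1) := by omega
        rw [if_neg hne]
        congr 1
      obtain ⟨ihn, ihs⟩ := ih (k + fj + 1) hklen
      have hdd : text.toList.drop (k + fj + 1) = (text.toList.drop k).drop (fj + 1) := by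
        rw [List.drop_drop, Nat.add_assoc]
      constructor
      · intro hnone
        rw [hstep] at hnone
        have := ihn hnone
        rw [hdd] at this
        rw [hsplit]
        simpa using this
      · intro j hj
        rw [hstep] at hj
        obtain ⟨j', rfl, hle, heq⟩ := ihs j hj
        refine ⟨j', rfl, hle, ?_⟩
        rw [heq, hsplit, List.drop_succ_cons, hdd]

theorem lines_eq (text : String) :
    (PySem.Str.split? text "\n").getD [] = List.map String.ofList (splitNL text.toList) := by
  rw [PySem.Str.split?.eq_1, PySem.Chars.split?.eq_1]
  rw [show ("\n" : String).toList = ['\n'] from rfl]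
  simp [splitOn_eq_splitNL]

theorem getElem?_of_drop_cons {α : Type} {l t : List α} {a : α} {n : Nat}
    (h : l.drop n = a :: t) : l[n]? = some a := by
  have := List.getElem?_drop (xs := l) (i := n) (j := 0)
  rw [h] at this
  simpa using this.symm

-- ===== VERDICT (by name: the statement is the Claim_ definition above) =====
theorem numberedLine_spec : Claim_equal_numberedLine := by
  intro text lineNum _
  unfold Spec_numberedLine numberedLine numberedLine_alt
  rw [lines_eq]
  have hidx : max (lineNum - 1) 0 = (((lineNum - 1).toNat : Nat) : Int) := by
    rw [Int.toNat_eq_max]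
  set L := text.toList with hL
  set n := (lineNum - 1).toNat with hn
  rw [hidx]
  simp only [Int.toNat_natCast, List.length_map]
  obtain ⟨hnone, hsome⟩ := numberedLineGo_spec text n 0 (Nat.zero_le _)
  cases hgo : numberedLineGo text n 0 with
  | none =>
    have hlen := hnone hgo
    simp only [List.drop_zero] at hlen
    rw [if_neg (by exact_mod_cast Nat.not_lt.mpr hlen)]
  | some j =>
    obtain ⟨j', rfl, hle, heq⟩ := hsome j hgo
    simp only [List.drop_zero] at heq
    have hne : (splitNL L).drop n ≠ [] := heq ▸ splitNL_ne_nil _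
    have hlt : n < (splitNL L).length := by
      by_contra hc
      exact hne (List.drop_eq_nil_of_le (by omega))
    rw [if_pos (by exact_mod_cast hlt)]
    have hgetD : (List.map String.ofList (splitNL L)).getD n "" =
        String.ofList ((splitNL L).getD n []) := by
      rw [List.getD_eq_getElem?_getD, List.getD_eq_getElem?_getD, List.getElem?_map]
      rcases h : (splitNL L)[n]? with _ | a
      · simp
      · simp
    rw [hgetD]
    have hfind : PySem.Str.findFrom text "\n" ((j' : Nat) : Int) =
        match fNL (L.drop j') with
        | none => -1
        | some fj => ((j' : Nat) : Int) + fj := by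
      rw [PySem.Str.findFrom_eq]
      rw [show ("\n" : String).toList = ['\n'] from rfl]
      rw [PySem.Chars.findFrom_natCast _ _ j' hle, find_eq_fNL]
      cases h : fNL (L.drop j') with
      | none => simp
      | some fj => simp
    cases hf : fNL (L.drop j') with
    | none =>
      have hs := fNL_none_splitNL hf
      rw [hs] at heq
      have : (splitNL L).getD n [] = L.drop j' := by
        rw [List.getD_eq_getElem?_getD, getElem?_of_drop_cons heq.symm]
        rfl
      rw [this]
      simp only [hfind, hf, if_true]
      rw [PySem.Str.slice]
      simp only [PySem.Chars.slice_eq_listSlice, PySem.List.slice_from_natCast]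
      rfl
    | some fj =>
      obtain ⟨_, hs⟩ := fNL_some_splitNL hf
      rw [hs] at heq
      have : (splitNL L).getD n [] = (L.drop j').take fj := by
        rw [List.getD_eq_getElem?_getD, getElem?_of_drop_cons heq.symm]
        rfl
      rw [this]
      simp only [hfind, hf]
      have hcond : ¬ ((j' : Int) + (fj : Int) = -1) := by omega
      rw [if_neg hcond, PySem.Str.slice]
      have : ((j' : Nat) : Int) + (fj : Int) = (((j' + fj : Nat) : Nat) : Int) := by push_cast; ring
      rw [this]
      simp only [PySem.Chars.slice_eq_listSlice]
      rw [show ((j' + fj : Nat) : Int) = ((j' : Nat) : Int) + ((fj : Nat) : Int) by push_cast; ring]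
      rw [PySem.List.slice_natCast_add]
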